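-- pv_equiv track=rewrite | github.com/vipul-jagal/ILab_Test | Week4 - Heap Sort/q2.py | executeOrders
-- ===== SOURCE A (Python) =====
-- import heapq
--
-- def executeOrders(marketAskPrice, marketBidPrice, ask_order_book, bid_order_book):
--     executed_orders = []
--     modified_ask_order_book = []
--     modified_bid_order_book = []
--
--     # Execute Bid orders with prices higher than or equal to marketAskPrice
--     while bid_order_book and -bid_order_book[0] >= marketAskPrice:
--         executed_orders.append(('Bid', -heapq.heappop(bid_order_book)))
--
--     # Execute Ask orders with prices lower than or equal to marketBidPrice
--     while ask_order_book and ask_order_book[0] <= marketBidPrice: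
--         executed_orders.append(('Ask', heapq.heappop(ask_order_book)))
--
--     # Reconstruct the modified order books
--     while bid_order_book:
--         modified_bid_order_book.append(-heapq.heappop(bid_order_book))
--     while ask_order_book:
--         modified_ask_order_book.append(heapq.heappop(ask_order_book))
--
--     return executed_orders, modified_ask_order_book, modified_bid_order_book
-- ===== SOURCE B (Python) =====
-- import heapq
--
-- def _drain(heap):
--     out = []
--     while heap:
--         out.append(heapq.heappop(heap))
--     return out
--
-- def executeOrders(marketAskPrice, marketBidPrice, ask_order_book, bid_order_book):
--     # Drain both heaps completely first (this empties the inputs, like A),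
--     # then split each drained sequence at the first element failing the threshold.
--     all_bids = [-x for x in _drain(bid_order_book)]
--     all_asks = _drain(ask_order_book)
--     i = 0
--     while i < len(all_bids) and all_bids[i] >= marketAskPrice:
--         i += 1
--     j = 0
--     while j < len(all_asks) and all_asks[j] <= marketBidPrice:
--         j += 1
--     executed_orders = [('Bid', p) for p in all_bids[:i]] + [('Ask', p) for p in all_asks[:j]]
--     return executed_orders, all_asks[j:], all_bids[i:]
-- ===== Notes on version B (the rewrite author's own statement) =====
-- stated objective: simpler
-- what changed: A interleaves two conditional heap-pop loops with two drain loops; B unconditionally drains both heaps into sorted lists first and then splits each list at the first element failing the price threshold, so the matching logic becomes a plain prefix split over a list.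
import Mathlib
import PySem

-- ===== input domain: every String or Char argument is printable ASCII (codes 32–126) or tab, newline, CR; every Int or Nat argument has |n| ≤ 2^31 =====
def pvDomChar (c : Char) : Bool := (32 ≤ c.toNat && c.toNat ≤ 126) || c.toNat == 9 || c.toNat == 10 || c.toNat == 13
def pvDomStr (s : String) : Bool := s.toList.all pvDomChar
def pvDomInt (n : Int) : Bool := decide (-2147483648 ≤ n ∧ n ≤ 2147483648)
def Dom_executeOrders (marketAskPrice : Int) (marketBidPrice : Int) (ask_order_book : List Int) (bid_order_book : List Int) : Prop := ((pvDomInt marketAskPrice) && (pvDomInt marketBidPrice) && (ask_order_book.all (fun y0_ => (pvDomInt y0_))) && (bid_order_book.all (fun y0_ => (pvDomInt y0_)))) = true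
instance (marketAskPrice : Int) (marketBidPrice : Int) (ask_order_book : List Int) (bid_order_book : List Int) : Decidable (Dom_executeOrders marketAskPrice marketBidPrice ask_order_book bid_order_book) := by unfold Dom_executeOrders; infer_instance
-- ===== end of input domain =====

-- B replaces A's two conditional pop-loops by an unconditional full drain of each heap
-- followed by a prefix split at the threshold (objective: simpler decomposition).
-- Both A and B empty the input lists in place in Python; the equivalence proved here
-- is about the return value.

-- ===== PORT A =====
-- Hand port of CPython's heapq.heappop (exact, including its _siftup/_siftdown on
-- arbitrary, possibly non-heap, lists); shared by both ports since both Pythons call it.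

-- inner while-loop of heapq._siftup (fuel = endpos; childpos grows strictly, so this suffices)
def pvSiftupLoop (endpos : Nat) : Nat → List Int → Nat → Nat → (List Int × Nat)
  | 0, h, pos, _ => (h, pos)
  | fuel+1, h, pos, childpos =>
    if childpos < endpos then
      let childpos := if childpos + 1 < endpos && !(h.getD childpos 0 < h.getD (childpos+1) 0)
                      then childpos + 1 else childpos
      pvSiftupLoop endpos fuel (h.set pos (h.getD childpos 0)) childpos (2*childpos+1)
    else (h, pos)

-- heapq._siftdown (fuel = pos; pos strictly decreases)
def pvSiftdownLoop (startpos : Nat) (newitem : Int) : Nat → List Int → Nat → List Int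
  | 0, h, pos => h.set pos newitem
  | fuel+1, h, pos =>
    if startpos < pos then
      let parentpos := (pos - 1) / 2
      let parent := h.getD parentpos 0
      if newitem < parent then pvSiftdownLoop startpos newitem fuel (h.set pos parent) parentpos
      else h.set pos newitem
    else h.set pos newitem

-- heapq._siftup
def pvSiftup (h : List Int) (pos : Nat) : List Int :=
  let endpos := h.length
  let newitem := h.getD pos 0
  let r := pvSiftupLoop endpos endpos h pos (2*pos+1)
  pvSiftdownLoop pos newitem r.2 r.1 r.2

-- heapq.heappop; none = IndexError on the empty list (never reached: callers test emptiness first)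
def pvHeappop (h : List Int) : Option (Int × List Int) :=
  match h.getLast? with
  | none => none
  | some lastelt =>
    let rest := h.dropLast
    if rest.isEmpty then some (lastelt, rest)
    else some (rest.getD 0 0, pvSiftup (rest.set 0 lastelt) 0)

-- `while heap: out.append(heappop(heap))` (fuel = length)
def pvDrain : Nat → List Int → List Int
  | 0, _ => []
  | fuel+1, h =>
    match pvHeappop h with
    | none => []
    | some (x, h') => x :: pvDrain fuel h'

-- `while heap and p(heap[0]): out.append(heappop(heap))` (fuel = length)
def pvPopLoop (p : Int → Bool) : Nat → List Int → List Int × List Int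
  | 0, h => ([], h)
  | fuel+1, h =>
    if !h.isEmpty && p (h.getD 0 0) then
      match pvHeappop h with
      | none => ([], h)
      | some (x, h') =>
        let r := pvPopLoop p fuel h'
        (x :: r.1, r.2)
    else ([], h)

def executeOrders (marketAskPrice : Int) (marketBidPrice : Int) (ask_order_book : List Int) (bid_order_book : List Int) : (List (String × Int)) × List Int × List Int :=
  let rb := pvPopLoop (fun v => decide (-v ≥ marketAskPrice)) bid_order_book.length bid_order_book
  let ra := pvPopLoop (fun v => decide (v ≤ marketBidPrice)) ask_order_book.length ask_order_book
  let executed_orders := rb.1.map (fun v => ("Bid", -v)) ++ ra.1.map (fun v => ("Ask", v))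
  let modified_bid_order_book := (pvDrain rb.2.length rb.2).map (fun v => -v)
  let modified_ask_order_book := pvDrain ra.2.length ra.2
  (executed_orders, modified_ask_order_book, modified_bid_order_book)

-- ===== PORT B =====
-- `i = 0; while i < len(l) and p(l[i]): i += 1`
def pvCountWhile (p : Int → Bool) : List Int → Nat
  | [] => 0
  | x :: xs => if p x then pvCountWhile p xs + 1 else 0

def executeOrders_alt (marketAskPrice : Int) (marketBidPrice : Int) (ask_order_book : List Int) (bid_order_book : List Int) : (List (String × Int)) × List Int × List Int :=
  let all_bids := (pvDrain bid_order_book.length bid_order_book).map (fun x => -x)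
  let all_asks := pvDrain ask_order_book.length ask_order_book
  let i := pvCountWhile (fun p => decide (p ≥ marketAskPrice)) all_bids
  let j := pvCountWhile (fun p => decide (p ≤ marketBidPrice)) all_asks
  let executed_orders := (all_bids.take i).map (fun p => ("Bid", p)) ++ (all_asks.take j).map (fun p => ("Ask", p))
  (executed_orders, all_asks.drop j, all_bids.drop i)

-- ===== PRECONDITION & SPEC =====
def Spec_executeOrders (marketAskPrice : Int) (marketBidPrice : Int) (ask_order_book : List Int) (bid_order_book : List Int) (out : (List (String × Int)) × List Int × List Int) : Prop := out = executeOrders_alt marketAskPrice marketBidPrice ask_order_book bid_order_book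
instance (marketAskPrice : Int) (marketBidPrice : Int) (ask_order_book : List Int) (bid_order_book : List Int) (out : (List (String × Int)) × List Int × List Int) : Decidable (Spec_executeOrders marketAskPrice marketBidPrice ask_order_book bid_order_book out) := by unfold Spec_executeOrders; infer_instance

-- ===== CLAIM =====
def Claim_equal_executeOrders : Prop := ∀ (marketAskPrice : Int) (marketBidPrice : Int) (ask_order_book : List Int) (bid_order_book : List Int), Dom_executeOrders marketAskPrice marketBidPrice ask_order_book bid_order_book → Spec_executeOrders marketAskPrice marketBidPrice ask_order_book bid_order_book (executeOrders marketAskPrice marketBidPrice ask_order_book bid_order_book)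

-- ===== LEMMAS AND PROOFS =====
theorem pvSiftdownLoop_length (startpos : Nat) (newitem : Int) :
    ∀ fuel h pos, (pvSiftdownLoop startpos newitem fuel h pos).length = h.length := by
  intro fuel
  induction fuel with
  | zero => intro h pos; simp [pvSiftdownLoop]
  | succ n ih =>
    intro h pos
    simp only [pvSiftdownLoop]
    split_ifs <;> simp [ih]

theorem pvSiftupLoop_length (endpos : Nat) :
    ∀ fuel h pos childpos, (pvSiftupLoop endpos fuel h pos childpos).1.length = h.length := by
  intro fuel
  induction fuel with
  | zero => intro h pos childpos; simp [pvSiftupLoop]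
  | succ n ih =>
    intro h pos childpos
    simp only [pvSiftupLoop]
    split_ifs <;> simp [ih]

theorem pvSiftup_length (h : List Int) (pos : Nat) : (pvSiftup h pos).length = h.length := by
  simp [pvSiftup, pvSiftdownLoop_length, pvSiftupLoop_length]

theorem pvHeappop_spec (h : List Int) (hne : h ≠ []) :
    ∃ h', pvHeappop h = some (h.getD 0 0, h') ∧ h'.length + 1 = h.length := by
  match h with
  | [a] =>
    exact ⟨[], by simp [pvHeappop], by simp⟩
  | a :: b :: t =>
    cases hg : (a :: b :: t).getLast? with
    | none => simp at hg
    | some lastelt =>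
      refine ⟨pvSiftup (((a :: b :: t).dropLast).set 0 lastelt) 0, ?_, ?_⟩
      · simp [pvHeappop, hg, List.dropLast_cons₂]
      · simp [pvSiftup_length, List.dropLast_cons₂]

theorem pvDrain_cons (h h' : List Int) (x : Int)
    (hp : pvHeappop h = some (x, h')) (hl : h'.length + 1 = h.length) :
    pvDrain h.length h = x :: pvDrain h'.length h' := by
  rw [← hl]
  simp [pvDrain, hp]

theorem pvPopLoop_spec (p : Int → Bool) :
    ∀ fuel h, h.length ≤ fuel →
      (pvPopLoop p fuel h).1 = (pvDrain h.length h).takeWhile p ∧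
      pvDrain (pvPopLoop p fuel h).2.length (pvPopLoop p fuel h).2
        = (pvDrain h.length h).dropWhile p := by
  intro fuel
  induction fuel with
  | zero =>
    intro h hle
    have : h = [] := List.eq_nil_of_length_eq_zero (Nat.le_zero.mp hle)
    subst this
    simp [pvPopLoop, pvDrain]
  | succ n ih =>
    intro h hle
    cases h with
    | nil => simp [pvPopLoop, pvDrain]
    | cons a t =>
      obtain ⟨h', hp, hl⟩ := pvHeappop_spec (a :: t) (by simp)
      simp only [List.getD_cons_zero] at hp
      have hdrain := pvDrain_cons (a :: t) h' a hp hl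
      simp only [List.length_cons] at hdrain hle hl
      have ihh := ih h' (by omega)
      by_cases hpx : p a = true
      · simp [pvPopLoop, hp, hpx, hdrain, ihh.1, ihh.2]
      · simp [pvPopLoop, hpx, hdrain]

theorem pvCountWhile_take (p : Int → Bool) (l : List Int) :
    l.take (pvCountWhile p l) = l.takeWhile p := by
  induction l with
  | nil => simp [pvCountWhile]
  | cons x xs ih =>
    by_cases hx : p x = true <;> simp [pvCountWhile, hx, ih]

theorem pvCountWhile_drop (p : Int → Bool) (l : List Int) :
    l.drop (pvCountWhile p l) = l.dropWhile p := by
  induction l with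
  | nil => simp [pvCountWhile]
  | cons x xs ih =>
    by_cases hx : p x = true <;> simp [pvCountWhile, hx, ih]

-- ===== VERDICT =====
theorem executeOrders_spec : Claim_equal_executeOrders := by
  unfold Claim_equal_executeOrders
  intro mAsk mBid ask bid _
  unfold Spec_executeOrders executeOrders executeOrders_alt
  obtain ⟨hb1, hb2⟩ := pvPopLoop_spec (fun v => decide (-v ≥ mAsk)) bid.length bid le_rfl
  obtain ⟨ha1, ha2⟩ := pvPopLoop_spec (fun v => decide (v ≤ mBid)) ask.length ask le_rfl
  simp only [pvCountWhile_take, pvCountWhile_drop, List.takeWhile_map, List.dropWhile_map,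
    List.map_map, Function.comp_def, hb1, hb2, ha1, ha2]
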